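-- pv_equiv track=rewrite | github.com/ChuchuComete/party-ranking | videos/results.py | nb_columns
-- ===== SOURCE A (Python) =====
-- def nb_columns(order):
--     C = []
--     people = len(order)
--     if people <= 18:
--         if people % 2 == 0:
--             for i in range(2):
--                 C.append(int(people / 2))
--             return C
--         elif people % 2 == 1:
--             people -= 1
--             C.append(int(people / 2 + 1))
--             C.append(int(people / 2))
--             return C
--     elif people <= 36:
--         if people % 4 == 0:
--             for i in range(4):
--                 C.append(int(people / 4))
--             return C
--         elif people % 4 == 1:
--             people -= 1
--             C.append(int(people / 4 + 1))
--             for i in range(3):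
--                 C.append(int(people / 4))
--             return C
--         elif people % 4 == 2:
--             people -= 2
--             for i in range(2):
--                 C.append(int(people / 4 + 1))
--             for i in range(2):
--                 C.append(int(people / 4))
--             return C
--         elif people % 4 == 3:
--             people -= 3
--             for i in range(3):
--                 C.append(int(people / 4 + 1))
--             C.append(int(people / 4))
--             return C
--     else:
--         if people % 6 == 0:
--             for i in range(6):
--                 C.append(int(people / 6))
--             return C
--         elif people % 6 == 1:
--             people -= 1
--             C.append(int(people / 6 + 1))
--             for i in range(5):
--                 C.append(int(people / 6))
--             return C
--         elif people % 6 == 2: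
--             people -= 2
--             for i in range(2):
--                 C.append(int(people / 6 + 1))
--             for i in range(4):
--                 C.append(int(people / 6))
--             return C
--         elif people % 6 == 3:
--             people -= 3
--             for i in range(3):
--                 C.append(int(people / 6 + 1))
--             for i in range(3):
--                 C.append(int(people / 6))
--             return C
--         elif people % 6 == 4:
--             people -= 4
--             for i in range(4):
--                 C.append(int(people / 6 + 1))
--             for i in range(2):
--                 C.append(int(people / 6))
--             return C
--         elif people % 6 == 5:
--             people -= 5
--             for i in range(5):
--                 C.append(int(people / 6 + 1))
--             C.append(int(people / 6))
--             return C
-- ===== SOURCE B (Python) =====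
-- def nb_columns(order):
--     people = len(order)
--     ncols = 2 if people <= 18 else 4 if people <= 36 else 6
--     base, rem = divmod(people, ncols)
--     return [base + 1] * rem + [base] * (ncols - rem)
-- ===== Notes on version B (the rewrite author's own statement) =====
-- stated objective: simpler
-- what changed: Replaced the 12-branch remainder case analysis with one divmod: pick ncols by the two thresholds, then return [base+1]*rem + [base]*(ncols-rem).
import Mathlib
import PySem

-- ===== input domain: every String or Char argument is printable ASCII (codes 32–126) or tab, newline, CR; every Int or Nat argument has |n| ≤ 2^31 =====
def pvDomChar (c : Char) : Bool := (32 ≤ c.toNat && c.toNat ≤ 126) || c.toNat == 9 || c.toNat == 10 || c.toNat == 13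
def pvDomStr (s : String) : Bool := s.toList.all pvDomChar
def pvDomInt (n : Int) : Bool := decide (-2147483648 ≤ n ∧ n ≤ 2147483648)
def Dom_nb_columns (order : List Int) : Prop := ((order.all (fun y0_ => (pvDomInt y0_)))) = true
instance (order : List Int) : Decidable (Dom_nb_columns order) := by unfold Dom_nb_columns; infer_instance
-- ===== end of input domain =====

-- B replaces A's 12-branch remainder case analysis with a single divmod and two replicated blocks (objective: simpler).


-- ===== PORT A =====
-- A's body depends only on people = len(order); factored into a helper on that value.
-- Python's int(people / k) (float division then truncation) is ported as PySem.Int.floordiv: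
-- exact here, since at every such site people is non-negative, divisible by k, and < 2^53.
def nb_columns_core (people0 : Int) : List Int :=
  let C : List Int := []
  let people := people0
  if people ≤ 18 then
    if PySem.Int.mod people 2 = 0 then
      (PySem.List.pyRange 0 2 1).foldl (fun C _ => C ++ [PySem.Int.floordiv people 2]) C
    else if PySem.Int.mod people 2 = 1 then
      let people := people - 1
      let C := C ++ [PySem.Int.floordiv people 2 + 1]
      C ++ [PySem.Int.floordiv people 2]
    else C
  else if people ≤ 36 then
    if PySem.Int.mod people 4 = 0 then
      (PySem.List.pyRange 0 4 1).foldl (fun C _ => C ++ [PySem.Int.floordiv people 4]) C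
    else if PySem.Int.mod people 4 = 1 then
      let people := people - 1
      let C := C ++ [PySem.Int.floordiv people 4 + 1]
      (PySem.List.pyRange 0 3 1).foldl (fun C _ => C ++ [PySem.Int.floordiv people 4]) C
    else if PySem.Int.mod people 4 = 2 then
      let people := people - 2
      let C := (PySem.List.pyRange 0 2 1).foldl (fun C _ => C ++ [PySem.Int.floordiv people 4 + 1]) C
      (PySem.List.pyRange 0 2 1).foldl (fun C _ => C ++ [PySem.Int.floordiv people 4]) C
    else if PySem.Int.mod people 4 = 3 then
      let people := people - 3
      let C := (PySem.List.pyRange 0 3 1).foldl (fun C _ => C ++ [PySem.Int.floordiv people 4 + 1]) C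
      C ++ [PySem.Int.floordiv people 4]
    else C
  else
    if PySem.Int.mod people 6 = 0 then
      (PySem.List.pyRange 0 6 1).foldl (fun C _ => C ++ [PySem.Int.floordiv people 6]) C
    else if PySem.Int.mod people 6 = 1 then
      let people := people - 1
      let C := C ++ [PySem.Int.floordiv people 6 + 1]
      (PySem.List.pyRange 0 5 1).foldl (fun C _ => C ++ [PySem.Int.floordiv people 6]) C
    else if PySem.Int.mod people 6 = 2 then
      let people := people - 2
      let C := (PySem.List.pyRange 0 2 1).foldl (fun C _ => C ++ [PySem.Int.floordiv people 6 + 1]) C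
      (PySem.List.pyRange 0 4 1).foldl (fun C _ => C ++ [PySem.Int.floordiv people 6]) C
    else if PySem.Int.mod people 6 = 3 then
      let people := people - 3
      let C := (PySem.List.pyRange 0 3 1).foldl (fun C _ => C ++ [PySem.Int.floordiv people 6 + 1]) C
      (PySem.List.pyRange 0 3 1).foldl (fun C _ => C ++ [PySem.Int.floordiv people 6]) C
    else if PySem.Int.mod people 6 = 4 then
      let people := people - 4
      let C := (PySem.List.pyRange 0 4 1).foldl (fun C _ => C ++ [PySem.Int.floordiv people 6 + 1]) C
      (PySem.List.pyRange 0 2 1).foldl (fun C _ => C ++ [PySem.Int.floordiv people 6]) C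
    else if PySem.Int.mod people 6 = 5 then
      let people := people - 5
      let C := (PySem.List.pyRange 0 5 1).foldl (fun C _ => C ++ [PySem.Int.floordiv people 6 + 1]) C
      C ++ [PySem.Int.floordiv people 6]
    else C

def nb_columns (order : List Int) : List Int :=
  nb_columns_core (order.length : Int)

-- ===== PORT B =====
def nb_columns_alt_core (people : Int) : List Int :=
  let ncols : Int := if people ≤ 18 then 2 else if people ≤ 36 then 4 else 6
  let base := PySem.Int.floordiv people ncols
  let rem := PySem.Int.mod people ncols
  List.replicate rem.toNat (base + 1) ++ List.replicate (ncols - rem).toNat base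

def nb_columns_alt (order : List Int) : List Int :=
  nb_columns_alt_core (order.length : Int)

-- ===== PRECONDITION & SPEC =====
def Spec_nb_columns (order : List Int) (out : List Int) : Prop := out = nb_columns_alt order
instance (order : List Int) (out : List Int) : Decidable (Spec_nb_columns order out) := by unfold Spec_nb_columns; infer_instance

-- ===== CLAIM (what is proved, stated in full; the proofs are below) =====
def Claim_equal_nb_columns : Prop := ∀ (order : List Int), Dom_nb_columns order → Spec_nb_columns order (nb_columns order)

-- ===== LEMMAS AND PROOFS =====

theorem nb_core_eq (p : Int) (hp : 0 ≤ p) : nb_columns_core p = nb_columns_alt_core p := by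
  rcases (show p ≤ 36 ∨ 36 < p by omega) with h | h
  · interval_cases p <;> decide
  · obtain ⟨m, r, hr0, hr6, hpe⟩ : ∃ m r : Int, 0 ≤ r ∧ r < 6 ∧ p = 6 * m + r :=
      ⟨p / 6, p % 6, by omega, by omega, by omega⟩
    subst hpe
    have r2 : PySem.List.pyRange 0 2 1 = [0, 1] := by decide
    have r3 : PySem.List.pyRange 0 3 1 = [0, 1, 2] := by decide
    have r4 : PySem.List.pyRange 0 4 1 = [0, 1, 2, 3] := by decide
    have r5 : PySem.List.pyRange 0 5 1 = [0, 1, 2, 3, 4] := by decide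
    have r6 : PySem.List.pyRange 0 6 1 = [0, 1, 2, 3, 4, 5] := by decide
    rcases (show r = 0 ∨ r = 1 ∨ r = 2 ∨ r = 3 ∨ r = 4 ∨ r = 5 by omega) with hr6 | hr6 | hr6 | hr6 | hr6 | hr6
    · subst hr6
      have hmod : PySem.Int.mod (6 * m + 0) 6 = 0 := by
        rw [PySem.Int.mod_eq_emod_of_pos (by norm_num)]; omega
      have hm1 : ¬ PySem.Int.mod (6 * m + 0) 6 = 1 := by rw [hmod]; norm_num
      have hm2 : ¬ PySem.Int.mod (6 * m + 0) 6 = 2 := by rw [hmod]; norm_num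
      have hm3 : ¬ PySem.Int.mod (6 * m + 0) 6 = 3 := by rw [hmod]; norm_num
      have hm4 : ¬ PySem.Int.mod (6 * m + 0) 6 = 4 := by rw [hmod]; norm_num
      have hm5 : ¬ PySem.Int.mod (6 * m + 0) 6 = 5 := by rw [hmod]; norm_num
      have h18 : ¬ (6 * m + 0 : Int) ≤ 18 := by omega
      have h36 : ¬ (6 * m + 0 : Int) ≤ 36 := by omega
      have hb : PySem.Int.floordiv (6 * m + 0) 6 = m := by
        rw [PySem.Int.floordiv_eq_ediv_of_pos (by norm_num)]; omega
      simp only [nb_columns_core, nb_columns_alt_core, r2, r3, r4, r5, r6, List.foldl,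
        if_neg h18, if_neg h36, hmod, hb]
      rfl
    · subst hr6
      have hmod : PySem.Int.mod (6 * m + 1) 6 = 1 := by
        rw [PySem.Int.mod_eq_emod_of_pos (by norm_num)]; omega
      have hm0 : ¬ PySem.Int.mod (6 * m + 1) 6 = 0 := by rw [hmod]; norm_num
      have hm2 : ¬ PySem.Int.mod (6 * m + 1) 6 = 2 := by rw [hmod]; norm_num
      have hm3 : ¬ PySem.Int.mod (6 * m + 1) 6 = 3 := by rw [hmod]; norm_num
      have hm4 : ¬ PySem.Int.mod (6 * m + 1) 6 = 4 := by rw [hmod]; norm_num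
      have hm5 : ¬ PySem.Int.mod (6 * m + 1) 6 = 5 := by rw [hmod]; norm_num
      have h18 : ¬ (6 * m + 1 : Int) ≤ 18 := by omega
      have h36 : ¬ (6 * m + 1 : Int) ≤ 36 := by omega
      have hd : PySem.Int.floordiv (6 * m + 1 - 1) 6 = m := by
        rw [PySem.Int.floordiv_eq_ediv_of_pos (by norm_num)]; omega
      have hb : PySem.Int.floordiv (6 * m + 1) 6 = m := by
        rw [PySem.Int.floordiv_eq_ediv_of_pos (by norm_num)]; omega
      simp only [nb_columns_core, nb_columns_alt_core, r2, r3, r4, r5, r6, List.foldl,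
        if_neg h18, if_neg h36, hmod, hd, hb]
      rfl
    · subst hr6
      have hmod : PySem.Int.mod (6 * m + 2) 6 = 2 := by
        rw [PySem.Int.mod_eq_emod_of_pos (by norm_num)]; omega
      have hm0 : ¬ PySem.Int.mod (6 * m + 2) 6 = 0 := by rw [hmod]; norm_num
      have hm1 : ¬ PySem.Int.mod (6 * m + 2) 6 = 1 := by rw [hmod]; norm_num
      have hm3 : ¬ PySem.Int.mod (6 * m + 2) 6 = 3 := by rw [hmod]; norm_num
      have hm4 : ¬ PySem.Int.mod (6 * m + 2) 6 = 4 := by rw [hmod]; norm_num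
      have hm5 : ¬ PySem.Int.mod (6 * m + 2) 6 = 5 := by rw [hmod]; norm_num
      have h18 : ¬ (6 * m + 2 : Int) ≤ 18 := by omega
      have h36 : ¬ (6 * m + 2 : Int) ≤ 36 := by omega
      have hd : PySem.Int.floordiv (6 * m + 2 - 2) 6 = m := by
        rw [PySem.Int.floordiv_eq_ediv_of_pos (by norm_num)]; omega
      have hb : PySem.Int.floordiv (6 * m + 2) 6 = m := by
        rw [PySem.Int.floordiv_eq_ediv_of_pos (by norm_num)]; omega
      simp only [nb_columns_core, nb_columns_alt_core, r2, r3, r4, r5, r6, List.foldl,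
        if_neg h18, if_neg h36, hmod, hd, hb]
      rfl
    · subst hr6
      have hmod : PySem.Int.mod (6 * m + 3) 6 = 3 := by
        rw [PySem.Int.mod_eq_emod_of_pos (by norm_num)]; omega
      have hm0 : ¬ PySem.Int.mod (6 * m + 3) 6 = 0 := by rw [hmod]; norm_num
      have hm1 : ¬ PySem.Int.mod (6 * m + 3) 6 = 1 := by rw [hmod]; norm_num
      have hm2 : ¬ PySem.Int.mod (6 * m + 3) 6 = 2 := by rw [hmod]; norm_num
      have hm4 : ¬ PySem.Int.mod (6 * m + 3) 6 = 4 := by rw [hmod]; norm_num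
      have hm5 : ¬ PySem.Int.mod (6 * m + 3) 6 = 5 := by rw [hmod]; norm_num
      have h18 : ¬ (6 * m + 3 : Int) ≤ 18 := by omega
      have h36 : ¬ (6 * m + 3 : Int) ≤ 36 := by omega
      have hd : PySem.Int.floordiv (6 * m + 3 - 3) 6 = m := by
        rw [PySem.Int.floordiv_eq_ediv_of_pos (by norm_num)]; omega
      have hb : PySem.Int.floordiv (6 * m + 3) 6 = m := by
        rw [PySem.Int.floordiv_eq_ediv_of_pos (by norm_num)]; omega
      simp only [nb_columns_core, nb_columns_alt_core, r2, r3, r4, r5, r6, List.foldl,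
        if_neg h18, if_neg h36, hmod, hd, hb]
      rfl
    · subst hr6
      have hmod : PySem.Int.mod (6 * m + 4) 6 = 4 := by
        rw [PySem.Int.mod_eq_emod_of_pos (by norm_num)]; omega
      have hm0 : ¬ PySem.Int.mod (6 * m + 4) 6 = 0 := by rw [hmod]; norm_num
      have hm1 : ¬ PySem.Int.mod (6 * m + 4) 6 = 1 := by rw [hmod]; norm_num
      have hm2 : ¬ PySem.Int.mod (6 * m + 4) 6 = 2 := by rw [hmod]; norm_num
      have hm3 : ¬ PySem.Int.mod (6 * m + 4) 6 = 3 := by rw [hmod]; norm_num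
      have hm5 : ¬ PySem.Int.mod (6 * m + 4) 6 = 5 := by rw [hmod]; norm_num
      have h18 : ¬ (6 * m + 4 : Int) ≤ 18 := by omega
      have h36 : ¬ (6 * m + 4 : Int) ≤ 36 := by omega
      have hd : PySem.Int.floordiv (6 * m + 4 - 4) 6 = m := by
        rw [PySem.Int.floordiv_eq_ediv_of_pos (by norm_num)]; omega
      have hb : PySem.Int.floordiv (6 * m + 4) 6 = m := by
        rw [PySem.Int.floordiv_eq_ediv_of_pos (by norm_num)]; omega
      simp only [nb_columns_core, nb_columns_alt_core, r2, r3, r4, r5, r6, List.foldl,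
        if_neg h18, if_neg h36, hmod, hd, hb]
      rfl
    · subst hr6
      have hmod : PySem.Int.mod (6 * m + 5) 6 = 5 := by
        rw [PySem.Int.mod_eq_emod_of_pos (by norm_num)]; omega
      have hm0 : ¬ PySem.Int.mod (6 * m + 5) 6 = 0 := by rw [hmod]; norm_num
      have hm1 : ¬ PySem.Int.mod (6 * m + 5) 6 = 1 := by rw [hmod]; norm_num
      have hm2 : ¬ PySem.Int.mod (6 * m + 5) 6 = 2 := by rw [hmod]; norm_num
      have hm3 : ¬ PySem.Int.mod (6 * m + 5) 6 = 3 := by rw [hmod]; norm_num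
      have hm4 : ¬ PySem.Int.mod (6 * m + 5) 6 = 4 := by rw [hmod]; norm_num
      have h18 : ¬ (6 * m + 5 : Int) ≤ 18 := by omega
      have h36 : ¬ (6 * m + 5 : Int) ≤ 36 := by omega
      have hd : PySem.Int.floordiv (6 * m + 5 - 5) 6 = m := by
        rw [PySem.Int.floordiv_eq_ediv_of_pos (by norm_num)]; omega
      have hb : PySem.Int.floordiv (6 * m + 5) 6 = m := by
        rw [PySem.Int.floordiv_eq_ediv_of_pos (by norm_num)]; omega
      simp only [nb_columns_core, nb_columns_alt_core, r2, r3, r4, r5, r6, List.foldl,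
        if_neg h18, if_neg h36, hmod, hd, hb]
      rfl

-- ===== VERDICT (by name: the statement is the Claim_ definition above) =====
theorem nb_columns_spec : Claim_equal_nb_columns := by
  intro order _
  unfold Spec_nb_columns nb_columns nb_columns_alt
  exact nb_core_eq (order.length : Int) (by positivity)
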